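-- pv_equiv track=rewrite | github.com/refat-pasha/everything-with-py | OOP2_fall24/question solve spring-23/spring 24/ans_to_the_question2.py | recommendation_system
-- ===== SOURCE A (Python) =====
-- def recommendation_system(movies, user_genres):
--     recommendation = {}
--     for movie, genres in movies.items():
--         matching_genres = len(set(genres) & set(user_genres))
--
--         if matching_genres > 0:
--             recommendation[movie] = matching_genres
--     sorted_recommendations = sorted(recommendation, key=recommendation.get, reverse=True)
--     return sorted_recommendations
-- ===== SOURCE B (Python) =====
-- def recommendation_system(movies, user_genres):
--     wanted = set(user_genres)
--     buckets = {}
--     for movie, genres in movies.items():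
--         c = sum(1 for g in dict.fromkeys(genres) if g in wanted)
--         if c > 0:
--             buckets.setdefault(c, []).append(movie)
--     out = []
--     for c in range(len(wanted), 0, -1):
--         out.extend(buckets.get(c, []))
--     return out
-- ===== Notes on version B (the rewrite author's own statement) =====
-- stated objective: faster
-- what changed: B replaces A's comparison sort of movies by match count with a counting/bucket pass (each movie with a positive match count is appended to a bucket keyed by its count, buckets emitted from the highest count down to 1, insertion order preserved within a bucket), and builds the user-genre set once instead of once per movie.
import Mathlib
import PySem

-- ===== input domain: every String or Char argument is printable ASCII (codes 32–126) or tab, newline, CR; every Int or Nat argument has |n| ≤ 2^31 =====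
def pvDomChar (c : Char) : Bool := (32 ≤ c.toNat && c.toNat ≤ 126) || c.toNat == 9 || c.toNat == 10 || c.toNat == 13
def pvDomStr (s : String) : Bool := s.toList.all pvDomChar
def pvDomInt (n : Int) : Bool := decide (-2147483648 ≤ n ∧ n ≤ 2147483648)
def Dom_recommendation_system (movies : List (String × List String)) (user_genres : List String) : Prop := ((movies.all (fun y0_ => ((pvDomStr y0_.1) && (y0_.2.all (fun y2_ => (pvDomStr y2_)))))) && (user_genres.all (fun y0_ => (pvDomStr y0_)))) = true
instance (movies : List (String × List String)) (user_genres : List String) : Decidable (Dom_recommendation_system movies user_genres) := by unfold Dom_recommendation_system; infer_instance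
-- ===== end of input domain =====

-- B replaces A's comparison sort by a counting/bucket pass: per-movie match counts go into
-- buckets keyed by count, emitted from the highest count down (objective: alternative).


-- ===== PORT A =====
-- len(set(genres) & set(user_genres))
def pvMatch (genres user_genres : List String) : Int :=
  ((PySem.Set.inter (PySem.Set.ofList genres) (PySem.Set.ofList user_genres)).length : Int)

def recommendation_system (movies : List (String × List String)) (user_genres : List String) : List String :=
  let rec_ : PySem.Dict String Int :=
    (PySem.Dict.ofList movies).items.foldl
      (fun d mg =>
        let matching_genres := pvMatch mg.2 user_genres
        if matching_genres > 0 then d.insert mg.1 matching_genres else d)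
      PySem.Dict.empty
  PySem.List.sorted rec_.keys (fun k => rec_.getD k 0) true

-- ===== PORT B =====
def recommendation_system_alt (movies : List (String × List String)) (user_genres : List String) : List String :=
  let wanted := PySem.Set.ofList user_genres
  let buckets : PySem.Dict Int (List String) :=
    (PySem.Dict.ofList movies).items.foldl
      (fun b mg =>
        let c : Int := ((PySem.List.dedup mg.2).filter (fun g => PySem.Set.contains wanted g)).length
        if c > 0 then b.insert c (b.getD c [] ++ [mg.1]) else b)
      PySem.Dict.empty
  (PySem.List.pyRange (PySem.Set.len wanted) 0 (-1)).foldl (fun out c => out ++ buckets.getD c []) []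

-- ===== PRECONDITION & SPEC =====
def Spec_recommendation_system (movies : List (String × List String)) (user_genres : List String) (out : List String) : Prop := out = recommendation_system_alt movies user_genres
instance (movies : List (String × List String)) (user_genres : List String) (out : List String) : Decidable (Spec_recommendation_system movies user_genres out) := by unfold Spec_recommendation_system; infer_instance

-- ===== CLAIM (what is proved, stated in full; the proofs are below) =====
def Claim_equal_recommendation_system : Prop := ∀ (movies : List (String × List String)) (user_genres : List String), Dom_recommendation_system movies user_genres → Spec_recommendation_system movies user_genres (recommendation_system movies user_genres)

-- ===== LEMMAS AND PROOFS =====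

theorem pv_insertBy_cons {α : Type} (before : α → α → Bool) (x y : α) (ys : List α) :
    PySem.List.insertBy before x (y :: ys) =
      if before x y then x :: y :: ys else y :: PySem.List.insertBy before x ys := rfl

theorem pv_insertBy_skip {α : Type} (before : α → α → Bool) (x : α) (bs rest : List α)
    (h : ∀ b ∈ bs, before x b = false) :
    PySem.List.insertBy before x (bs ++ rest) = bs ++ PySem.List.insertBy before x rest := by
  induction bs with
  | nil => simp only [List.nil_append]
  | cons b bs ih =>
    simp only [List.cons_append, pv_insertBy_cons, h b (by simp)]
    simp only [Bool.false_eq_true, if_false, List.cons.injEq, true_and]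
    exact ih (fun b hb => h b (by simp [hb]))

theorem pv_insertBy_front {α : Type} (before : α → α → Bool) (x : α) (ys : List α)
    (h : ∀ y ∈ ys, before x y = true) :
    PySem.List.insertBy before x ys = x :: ys := by
  cases ys with
  | nil => rfl
  | cons y ys => simp [pv_insertBy_cons, h y (by simp)]

def pvConc {α : Type} (key : α → Int) (cs : List Int) (l : List α) : List α :=
  cs.flatMap (fun c => l.filter (fun y => key y == c))

theorem pv_key_mem_of_mem_conc {α : Type} (key : α → Int) (cs : List Int) (l : List α)
    (y : α) (hy : y ∈ pvConc key cs l) : key y ∈ cs := by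
  simp only [pvConc, List.mem_flatMap, List.mem_filter, beq_iff_eq] at hy
  obtain ⟨c, hc, _, rfl⟩ := hy
  exact hc

theorem pv_filter_snoc_eq {α : Type} (key : α → Int) (c : Int) (l : List α) (x : α)
    (hx : key x ≠ c) : (l ++ [x]).filter (fun y => key y == c) = l.filter (fun y => key y == c) := by
  simp [List.filter_append, hx]

theorem pv_conc_snoc_of_not_mem {α : Type} (key : α → Int) (cs : List Int) (l : List α) (x : α)
    (hx : key x ∉ cs) : pvConc key cs (l ++ [x]) = pvConc key cs l := by
  unfold pvConc
  exact List.flatMap_congr (fun c hc => pv_filter_snoc_eq key c l x (fun h => hx (h ▸ hc)))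

theorem pv_conc_snoc {α : Type} (key : α → Int) (x : α) :
    ∀ (cs : List Int) (l : List α), cs.Pairwise (· > ·) → key x ∈ cs →
    PySem.List.insertBy (fun a b => decide (key b < key a)) x (pvConc key cs l) =
      pvConc key cs (l ++ [x]) := by
  intro cs
  induction cs with
  | nil => intro l _ hx; simp at hx
  | cons c cs ih =>
    intro l hp hx
    have hlt : ∀ c' ∈ cs, c' < c := fun c' hc' => (List.pairwise_cons.1 hp).1 c' hc'
    have hconc : pvConc key (c :: cs) l
        = l.filter (fun y => key y == c) ++ pvConc key cs l := by
      simp [pvConc]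
    by_cases hxc : key x = c
    · -- x goes at the end of bucket c
      rw [hconc, pv_insertBy_skip _ _ _ _ (by
          intro b hb
          have : key b = c := by simpa using (List.mem_filter.1 hb).2
          simp [this, hxc]),
        pv_insertBy_front _ _ _ (by
          intro y hy
          have := pv_key_mem_of_mem_conc key cs l y hy
          have : key y < c := hlt _ this
          simp [hxc, this])]
      have hnm : key x ∉ cs := fun h => absurd (hlt _ h) (by simp [hxc])
      have h2 := pv_conc_snoc_of_not_mem key cs l x hnm
      have h1 : (l ++ [x]).filter (fun y => key y == c) = l.filter (fun y => key y == c) ++ [x] := by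
        simp [List.filter_append, hxc]
      have hr : pvConc key (c :: cs) (l ++ [x])
          = l.filter (fun y => key y == c) ++ [x] ++ pvConc key cs l := by
        have : pvConc key (c :: cs) (l ++ [x])
            = (l ++ [x]).filter (fun y => key y == c) ++ pvConc key cs (l ++ [x]) := by
          simp [pvConc]
        rw [this, h1, h2]
      rw [hr]
      simp
    · -- skip bucket c, recurse
      have hxcs : key x ∈ cs := by cases hx with
        | head => exact absurd rfl hxc
        | tail _ h => exact h
      have hxlt : key x < c := hlt _ hxcs
      rw [hconc, pv_insertBy_skip _ _ _ _ (by
          intro b hb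
          have hb' : key b = c := by simpa using (List.mem_filter.1 hb).2
          simp [hb']; omega),
        ih l (List.pairwise_cons.1 hp).2 hxcs]
      have hr : pvConc key (c :: cs) (l ++ [x])
          = l.filter (fun y => key y == c) ++ pvConc key cs (l ++ [x]) := by
        simp only [pvConc, List.flatMap_cons]
        rw [pv_filter_snoc_eq key c l x hxc]
      rw [hr]

theorem pv_sorted_rev_eq_conc {α : Type} (key : α → Int) (cs : List Int)
    (hp : cs.Pairwise (· > ·)) (l : List α) (hl : ∀ y ∈ l, key y ∈ cs) :
      PySem.List.sorted l key true = pvConc key cs l := by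
  rw [PySem.List.sorted_rev_eq_foldl_insertBy]
  induction l using List.reverseRecOn with
  | nil => simp [pvConc]
  | append_singleton l x ih =>
    rw [List.foldl_append]
    simp only [List.foldl_cons, List.foldl_nil]
    rw [ih (fun y hy => hl y (by simp [hy]))]
    exact pv_conc_snoc key x cs l hp (hl x (by simp))

theorem pv_A_items (f : String × List String → Int) :
    ∀ (I : List (String × List String)) (d : PySem.Dict String Int),
      (d.keys ++ I.map Prod.fst).Nodup →
      (I.foldl (fun d mg =>
          if f mg > 0 then d.insert mg.1 (f mg) else d) d).items
        = d.items ++ (I.filter (fun p => decide (f p > 0))).map (fun p => (p.1, f p)) := by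
  intro I
  induction I with
  | nil => intro d h; simp
  | cons p I ih =>
    intro d h
    have hnd := h
    rw [List.map_cons, List.nodup_append] at hnd
    simp only [List.foldl_cons, List.filter_cons]
    by_cases hf : f p > 0
    · have hnk : p.1 ∉ d.keys := fun hk => hnd.2.2 _ hk p.1 (by simp) rfl
      have hc : d.contains p.1 = false := by
        rw [PySem.Dict.contains_eq_decide_mem_keys]; simp [hnk]
      have hit := PySem.Dict.items_insert_of_not_contains d (f p) hc
      have hkeys : (d.insert p.1 (f p)).keys = d.keys ++ [p.1] := by
        simp only [PySem.Dict.keys, hit, List.map_append, List.map_cons, List.map_nil]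
      simp only [hf, if_true, decide_true]
      rw [ih _ (by rw [hkeys]; simpa [List.append_assoc] using h), hit]
      simp [List.append_assoc]
    · simp only [hf, if_false, decide_false]
      have hsub : (d.keys ++ I.map Prod.fst).Sublist (d.keys ++ p.1 :: I.map Prod.fst) :=
        (List.Sublist.refl _).append (List.sublist_cons_self _ _)
      simpa using ih d (h.sublist hsub)

theorem pv_B_getD (f : String × List String → Int) :
    ∀ (I : List (String × List String)) (b : PySem.Dict Int (List String)) (c : Int), 0 < c →
      (I.foldl (fun b mg =>
          if f mg > 0 then b.insert (f mg) (b.getD (f mg) [] ++ [mg.1]) else b) b).getD c []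
        = b.getD c [] ++ (I.filter (fun p => f p == c)).map Prod.fst := by
  intro I
  induction I with
  | nil => intro b c hc; simp
  | cons p I ih =>
    intro b c hc
    simp only [List.foldl_cons, List.filter_cons]
    by_cases hf : f p > 0
    · simp only [hf, if_true]
      rw [ih _ c hc, PySem.Dict.getD_insert]
      by_cases hec : c = f p
      · simp [hec, List.append_assoc]
      · have : (f p == c) = false := by simp; omega
        simp [hec, this]
    · simp only [hf, if_false]
      have : (f p == c) = false := by simp; omega
      rw [ih _ c hc, this]
      simp

-- B's per-movie count is A's pvMatch
theorem pv_count_eq (g u : List String) :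
    (((PySem.List.dedup g).filter (fun x => PySem.Set.contains (PySem.Set.ofList u) x)).length : Int)
      = pvMatch g u := by
  simp [pvMatch, PySem.Set.inter, PySem.List.dedup_eq_ofList]

theorem pv_match_le (g u : List String) : pvMatch g u ≤ PySem.Set.len (PySem.Set.ofList u) := by
  unfold pvMatch PySem.Set.len
  have h1 : (PySem.Set.inter (PySem.Set.ofList g) (PySem.Set.ofList u)).Nodup :=
    List.Nodup.sublist List.filter_sublist (PySem.Set.nodup_ofList g)
  have h2 : (PySem.Set.inter (PySem.Set.ofList g) (PySem.Set.ofList u)) ⊆ PySem.Set.ofList u := by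
    intro x hx
    have := (List.mem_filter.1 hx).2
    exact (PySem.Set.contains_iff _ _).1 this
  exact_mod_cast (List.subperm_of_subset h1 h2).length_le


theorem pv_main : ∀ (movies : List (String × List String)) (user_genres : List String), recommendation_system movies user_genres = recommendation_system_alt movies user_genres := by
  intro movies user_genres
  unfold recommendation_system recommendation_system_alt
  simp only [pv_count_eq]
  set I := (PySem.Dict.ofList movies).items with hI
  set n : Int := PySem.Set.len (PySem.Set.ofList user_genres) with hn
  set cs : List Int := PySem.List.pyRange n 0 (-1) with hcs
  have hcs_pair : cs.Pairwise (· > ·) := by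
    rw [hcs, PySem.List.pyRange_neg_one_eq_reverse, List.pairwise_reverse]
    exact PySem.List.pairwise_lt_pyRange_one _ _
  have hcs_mem : ∀ c : Int, c ∈ cs ↔ 0 < c ∧ c ≤ n := by
    intro c; rw [hcs]; exact PySem.List.mem_pyRange_neg_one
  have hIkeys : (I.map Prod.fst).Nodup := by
    have := PySem.Dict.nodup_keys_ofList movies
    simpa [PySem.Dict.keys, hI] using this
  have hitems := pv_A_items (fun p => pvMatch p.2 user_genres) I PySem.Dict.empty (by simpa using hIkeys)
  set N : List (String × Int) := (I.filter (fun p => decide (pvMatch p.2 user_genres > 0))).map (fun p => (p.1, pvMatch p.2 user_genres)) with hN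
  set rec_ : PySem.Dict String Int := I.foldl (fun d mg =>
      if pvMatch mg.2 user_genres > 0 then d.insert mg.1 (pvMatch mg.2 user_genres) else d) PySem.Dict.empty with hrec
  have hri : rec_.items = N := by simpa [hrec, hN] using hitems
  have hrk : rec_.keys = N.map Prod.fst := by simp [PySem.Dict.keys, hri]
  have hrk' : rec_.keys = (I.filter (fun p => decide (pvMatch p.2 user_genres > 0))).map Prod.fst := by
    rw [hrk, hN]; simp [List.map_map]
  have hNnodup : (N.map Prod.fst).Nodup := by
    rw [← hrk, hrk']
    exact hIkeys.sublist (List.Sublist.map _ List.filter_sublist)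
  have hkeyfun : ∀ q ∈ N, rec_.getD q.1 0 = q.2 := by
    intro q hq
    obtain ⟨k, v⟩ := q
    have hmem : (k, v) ∈ rec_.items := by rw [hri]; exact hq
    have := PySem.Dict.get?_of_mem_items rec_ hmem (by rw [PySem.Dict.keys, hri]; exact hNnodup)
    simp [PySem.Dict.getD, this]
  have hPmem : ∀ p ∈ I.filter (fun p => decide (pvMatch p.2 user_genres > 0)),
      0 < pvMatch p.2 user_genres ∧ pvMatch p.2 user_genres ≤ n := by
    intro p hp
    refine ⟨by simpa using (List.mem_filter.1 hp).2, ?_⟩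
    rw [hn]
    exact pv_match_le p.2 user_genres
  have hkeyp : ∀ p ∈ I.filter (fun p => decide (pvMatch p.2 user_genres > 0)),
      rec_.getD p.1 0 = pvMatch p.2 user_genres := by
    intro p hp
    exact hkeyfun (p.1, pvMatch p.2 user_genres) (by rw [hN]; exact List.mem_map.2 ⟨p, hp, rfl⟩)
  have hmemcs : ∀ y ∈ rec_.keys, rec_.getD y 0 ∈ cs := by
    intro y hy
    rw [hrk'] at hy
    obtain ⟨p, hp, rfl⟩ := List.mem_map.1 hy
    rw [hkeyp p hp]
    rcases hPmem p hp with ⟨h1, h2⟩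
    exact (hcs_mem _).2 ⟨h1, h2⟩
  have hAc : ∀ c ∈ cs, rec_.keys.filter (fun k => rec_.getD k 0 == c)
      = (I.filter (fun p => pvMatch p.2 user_genres == c)).map Prod.fst := by
    intro c hc
    have hcpos : 0 < c := ((hcs_mem c).1 hc).1
    rw [hrk', List.filter_map]
    rw [List.filter_congr (fun p hp => by
      simp only [Function.comp_apply]
      rw [hkeyp p hp])]
    rw [List.filter_filter]
    congr 1
    refine List.filter_congr (fun p _ => ?_)
    by_cases h : pvMatch p.2 user_genres = c
    · simp [h, hcpos]
    · simp [h]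
  rw [pv_sorted_rev_eq_conc (fun k => rec_.getD k 0) cs hcs_pair rec_.keys hmemcs]
  rw [PySem.List.foldl_append_eq_flatMap]
  rw [List.nil_append]
  unfold pvConc
  refine List.flatMap_congr (fun c hc => ?_)
  rw [hAc c hc]
  rw [pv_B_getD (fun p => pvMatch p.2 user_genres) I PySem.Dict.empty c ((hcs_mem c).1 hc).1]
  simp

-- ===== VERDICT (by name: the statement is the Claim_ definition above) =====
theorem recommendation_system_spec : Claim_equal_recommendation_system := by
  intro movies user_genres _
  unfold Spec_recommendation_system
  exact pv_main movies user_genres
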